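-- pv_equiv track=rewrite | github.com/dawsonnash/irv | car_map_to_category.py | map_car_to_category
-- ===== SOURCE A (Python) =====
-- def map_car_to_category(car_name):
--     lower_car_name = car_name.lower()
--     if any(x in lower_car_name for x in ['suv', 'crossover', 'wagon']):
--         return 'SUV'
--     elif 'truck' in lower_car_name or 'pickup' in lower_car_name:
--         return 'Truck'
--     elif any(x in lower_car_name for x in ['sport', 'coupe', 'convertible', 'roadster', 'spyder', 'vantage']):
--         return 'Sportscar'
--     elif 'van' in lower_car_name or 'minivan' in lower_car_name:
--         return 'Van'
--     else:
--         return 'Car'  # Default category if no other category fits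
-- ===== SOURCE B (Python) =====
-- # Compute ALL matching keywords in one pass and return the highest-priority
-- # (lowest-numbered) matched category, instead of early-returning per branch.
-- KEYWORD_PRIORITY = {
--     'suv': 0, 'crossover': 0, 'wagon': 0,
--     'truck': 1, 'pickup': 1,
--     'sport': 2, 'coupe': 2, 'convertible': 2, 'roadster': 2, 'spyder': 2, 'vantage': 2,
--     'van': 3, 'minivan': 3,
-- }
-- CATEGORIES = ['SUV', 'Truck', 'Sportscar', 'Van', 'Car']
--
-- def map_car_to_category(car_name):
--     name = car_name.lower()
--     best = 4  # priority of the default category 'Car'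
--     for kw, pri in KEYWORD_PRIORITY.items():
--         if pri < best and kw in name:
--             best = pri
--     return CATEGORIES[best]
-- ===== Notes on version B (the rewrite author's own statement) =====
-- stated objective: alternative
-- what changed: Instead of an if/elif cascade with early returns, B folds once over a flat keyword->priority table keeping the minimum matched priority, then indexes a category array with it; correctness holds because the cascade's answer is exactly the highest-priority matching group.
import Mathlib
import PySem

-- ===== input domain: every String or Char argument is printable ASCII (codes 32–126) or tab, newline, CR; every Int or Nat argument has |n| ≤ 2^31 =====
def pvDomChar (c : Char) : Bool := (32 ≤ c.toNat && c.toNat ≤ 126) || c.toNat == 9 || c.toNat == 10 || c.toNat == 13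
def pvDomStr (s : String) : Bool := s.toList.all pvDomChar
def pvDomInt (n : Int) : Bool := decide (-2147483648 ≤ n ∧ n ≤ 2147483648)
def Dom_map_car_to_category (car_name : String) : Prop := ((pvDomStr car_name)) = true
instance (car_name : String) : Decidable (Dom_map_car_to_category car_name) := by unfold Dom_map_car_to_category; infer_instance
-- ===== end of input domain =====

-- B folds once over a flat keyword->priority table keeping the minimum matched priority and
-- indexes a category array, instead of A's if/elif cascade with early returns (alternative; same cost).

-- ===== PORT A =====
def map_car_to_category (car_name : String) : String :=
  let lower_car_name := PySem.Str.lower car_name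
  if ["suv", "crossover", "wagon"].any (fun x => PySem.Str.isIn x lower_car_name) then "SUV"
  else if PySem.Str.isIn "truck" lower_car_name || PySem.Str.isIn "pickup" lower_car_name then "Truck"
  else if ["sport", "coupe", "convertible", "roadster", "spyder", "vantage"].any (fun x => PySem.Str.isIn x lower_car_name) then "Sportscar"
  else if PySem.Str.isIn "van" lower_car_name || PySem.Str.isIn "minivan" lower_car_name then "Van"
  else "Car"

-- ===== PORT B =====
-- KEYWORD_PRIORITY dict as an association list in insertion order
def pvKeywordPriority : List (String × Int) :=
  [("suv", 0), ("crossover", 0), ("wagon", 0),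
   ("truck", 1), ("pickup", 1),
   ("sport", 2), ("coupe", 2), ("convertible", 2), ("roadster", 2), ("spyder", 2), ("vantage", 2),
   ("van", 3), ("minivan", 3)]

def pvCategories : List String := ["SUV", "Truck", "Sportscar", "Van", "Car"]

def map_car_to_category_alt (car_name : String) : String :=
  let name := PySem.Str.lower car_name
  let best : Int :=
    pvKeywordPriority.foldl
      (fun b kp => if kp.2 < b && PySem.Str.isIn kp.1 name then kp.2 else b) 4
  match PySem.List.pyGet? pvCategories best with
  | some c => c
  | none => ""  -- unreachable: best ∈ [0,4]

-- ===== PRECONDITION & SPEC =====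
def Spec_map_car_to_category (car_name : String) (out : String) : Prop := out = map_car_to_category_alt car_name
instance (car_name : String) (out : String) : Decidable (Spec_map_car_to_category car_name out) := by unfold Spec_map_car_to_category; infer_instance

-- ===== CLAIM (what is proved, stated in full; the proofs are below) =====
def Claim_equal_map_car_to_category : Prop := ∀ (car_name : String), Dom_map_car_to_category car_name → Spec_map_car_to_category car_name (map_car_to_category car_name)

-- ===== LEMMAS AND PROOFS =====

-- folding a block of keywords sharing one priority = one min-update with the block's "any match"
theorem pv_foldl_const_pri (ks : List String) (p : Int) (name : String) (b : Int) :
    (ks.map (fun k => (k, p))).foldl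
      (fun b kp => if kp.2 < b && PySem.Str.isIn kp.1 name then kp.2 else b) b
    = if p < b && ks.any (fun k => PySem.Str.isIn k name) then p else b := by
  induction ks generalizing b with
  | nil => simp
  | cons k ks ih =>
    simp only [List.map_cons, List.foldl_cons, List.any_cons, ih]
    by_cases hm : PySem.Str.isIn k name = true
    · simp only [hm, Bool.true_or, Bool.and_true]
      by_cases hp : p < b
      · simp [hp]
      · simp [hp]
    · simp only [Bool.not_eq_true] at hm
      have hm' : PySem.Chars.isIn k.toList name.toList = false := by simpa using hm
      simp [hm']

theorem pvKeywordPriority_blocks :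
    pvKeywordPriority =
      (["suv", "crossover", "wagon"].map (fun k => (k, (0 : Int)))) ++
      (["truck", "pickup"].map (fun k => (k, (1 : Int)))) ++
      (["sport", "coupe", "convertible", "roadster", "spyder", "vantage"].map (fun k => (k, (2 : Int)))) ++
      (["van", "minivan"].map (fun k => (k, (3 : Int)))) := by
  rfl

-- ===== VERDICT (by name: the statement is the Claim_ definition above) =====
theorem map_car_to_category_spec : Claim_equal_map_car_to_category := by
  intro s _
  unfold Spec_map_car_to_category map_car_to_category map_car_to_category_alt
  rw [pvKeywordPriority_blocks]
  simp only [List.foldl_append, pv_foldl_const_pri]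
  set name := PySem.Str.lower s with hname
  by_cases h1 : (["suv", "crossover", "wagon"].any (fun k => PySem.Str.isIn k name)) = true
  · have h1' : PySem.Chars.isIn ['s','u','v'] name.toList = true ∨
        PySem.Chars.isIn ['c','r','o','s','s','o','v','e','r'] name.toList = true ∨
        PySem.Chars.isIn ['w','a','g','o','n'] name.toList = true := by simpa using h1
    simp [h1', PySem.List.pyGet?, PySem.List.pyIdx?, pvCategories]
  · rw [Bool.not_eq_true] at h1
    have ⟨ha1, hb1, hc1⟩ : PySem.Chars.isIn ['s','u','v'] name.toList = false ∧
        PySem.Chars.isIn ['c','r','o','s','s','o','v','e','r'] name.toList = false ∧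
        PySem.Chars.isIn ['w','a','g','o','n'] name.toList = false := by simpa using h1
    by_cases h2 : (["truck", "pickup"].any (fun k => PySem.Str.isIn k name)) = true
    · have h2' : PySem.Chars.isIn ['t','r','u','c','k'] name.toList = true ∨
          PySem.Chars.isIn ['p','i','c','k','u','p'] name.toList = true := by simpa using h2
      simp [ha1, hb1, hc1, h2', PySem.List.pyGet?, PySem.List.pyIdx?, pvCategories]
    · rw [Bool.not_eq_true] at h2
      have ⟨ha2, hb2⟩ : PySem.Chars.isIn ['t','r','u','c','k'] name.toList = false ∧
          PySem.Chars.isIn ['p','i','c','k','u','p'] name.toList = false := by simpa using h2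
      by_cases h3 : (["sport", "coupe", "convertible", "roadster", "spyder", "vantage"].any (fun k => PySem.Str.isIn k name)) = true
      · have h3' : PySem.Chars.isIn ['s','p','o','r','t'] name.toList = true ∨
            PySem.Chars.isIn ['c','o','u','p','e'] name.toList = true ∨
            PySem.Chars.isIn ['c','o','n','v','e','r','t','i','b','l','e'] name.toList = true ∨
            PySem.Chars.isIn ['r','o','a','d','s','t','e','r'] name.toList = true ∨
            PySem.Chars.isIn ['s','p','y','d','e','r'] name.toList = true ∨
            PySem.Chars.isIn ['v','a','n','t','a','g','e'] name.toList = true := by simpa using h3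
        simp [ha1, hb1, hc1, ha2, hb2, h3', PySem.List.pyGet?, PySem.List.pyIdx?, pvCategories]
      · rw [Bool.not_eq_true] at h3
        have ⟨ha3, hb3, hc3, hd3, he3, hf3⟩ : PySem.Chars.isIn ['s','p','o','r','t'] name.toList = false ∧
            PySem.Chars.isIn ['c','o','u','p','e'] name.toList = false ∧
            PySem.Chars.isIn ['c','o','n','v','e','r','t','i','b','l','e'] name.toList = false ∧
            PySem.Chars.isIn ['r','o','a','d','s','t','e','r'] name.toList = false ∧
            PySem.Chars.isIn ['s','p','y','d','e','r'] name.toList = false ∧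
            PySem.Chars.isIn ['v','a','n','t','a','g','e'] name.toList = false := by simpa using h3
        by_cases h4 : (["van", "minivan"].any (fun k => PySem.Str.isIn k name)) = true
        · have h4' : PySem.Chars.isIn ['v','a','n'] name.toList = true ∨
              PySem.Chars.isIn ['m','i','n','i','v','a','n'] name.toList = true := by simpa using h4
          simp [ha1, hb1, hc1, ha2, hb2, ha3, hb3, hc3, hd3, he3, hf3, h4',
            PySem.List.pyGet?, PySem.List.pyIdx?, pvCategories]
        · rw [Bool.not_eq_true] at h4
          have ⟨ha4, hb4⟩ : PySem.Chars.isIn ['v','a','n'] name.toList = false ∧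
              PySem.Chars.isIn ['m','i','n','i','v','a','n'] name.toList = false := by simpa using h4
          simp [ha1, hb1, hc1, ha2, hb2, ha3, hb3, hc3, hd3, he3, hf3, ha4, hb4,
            PySem.List.pyGet?, PySem.List.pyIdx?, pvCategories]
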